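-- pv_equiv track=rewrite | github.com/faridhash26/Bishop_Movement_Checker | locations_of_bishop.py | calculate_odd_even
-- ===== SOURCE A (Python) =====
-- def append_list(nums):
--     all=[]
--     for x in nums:
--         for y in nums :
--             all.append((x,y))
--     return all
--
-- def calculate_odd_even(number):
--     odds = []
--     evens=[]
--     for num in range(1,number+1):
--         if (num % 2) == 0:
--             evens.append(num)
--         else:
--             odds.append(num)
--     all_odds_chesss=append_list(odds)
--     all_even_chesss=append_list(evens)
--     joinedlist = all_even_chesss + all_odds_chesss
--     joinedlist.sort()
--     return joinedlist
-- ===== SOURCE B (Python) =====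
-- def calculate_odd_even(number):
--     result = []
--     for x in range(1, number + 1):
--         for y in range(1, number + 1):
--             if (x - y) % 2 == 0:
--                 result.append((x, y))
--     return result
-- ===== Notes on version B (the rewrite author's own statement) =====
-- stated objective: alternative
-- what changed: Instead of partitioning 1..n into odds/evens, building both cross-product lists, concatenating and sorting, B emits the same-parity pairs directly in sorted order with one nested loop and a parity test, so no sort is needed.
import Mathlib
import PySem

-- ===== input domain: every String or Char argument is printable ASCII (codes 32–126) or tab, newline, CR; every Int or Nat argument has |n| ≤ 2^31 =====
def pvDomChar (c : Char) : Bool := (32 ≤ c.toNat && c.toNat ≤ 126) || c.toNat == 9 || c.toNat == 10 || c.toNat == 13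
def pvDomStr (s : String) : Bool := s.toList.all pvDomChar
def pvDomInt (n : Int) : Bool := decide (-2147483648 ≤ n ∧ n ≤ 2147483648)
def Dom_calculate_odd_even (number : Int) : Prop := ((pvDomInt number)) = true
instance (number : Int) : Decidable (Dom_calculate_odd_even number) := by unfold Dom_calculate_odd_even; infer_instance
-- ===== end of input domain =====

-- B replaces A's partition + two cross-products + concatenate + sort by directly emitting
-- the same-parity pairs in sorted order with one nested loop (the sort disappears).

-- ===== PORT A =====
def append_list (nums : List Int) : List (Int × Int) :=
  nums.foldl (fun all x => nums.foldl (fun all y => all ++ [(x, y)]) all) []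

def calculate_odd_even (number : Int) : List (Int × Int) :=
  let oe := (PySem.List.pyRange 1 (number + 1) 1).foldl
    (fun (oe : List Int × List Int) num =>
      if PySem.Int.mod num 2 == 0 then (oe.1, oe.2 ++ [num]) else (oe.1 ++ [num], oe.2))
    ([], [])
  let all_odds_chesss := append_list oe.1
  let all_even_chesss := append_list oe.2
  let joinedlist := all_even_chesss ++ all_odds_chesss
  PySem.List.sorted2 joinedlist Prod.fst Prod.snd

-- ===== PORT B =====
def calculate_odd_even_alt (number : Int) : List (Int × Int) :=
  (PySem.List.pyRange 1 (number + 1) 1).foldl (fun result x =>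
    (PySem.List.pyRange 1 (number + 1) 1).foldl (fun result y =>
      if PySem.Int.mod (x - y) 2 == 0 then result ++ [(x, y)] else result) result) []

-- ===== PRECONDITION & SPEC =====
def Spec_calculate_odd_even (number : Int) (out : List (Int × Int)) : Prop := out = calculate_odd_even_alt number
instance (number : Int) (out : List (Int × Int)) : Decidable (Spec_calculate_odd_even number out) := by unfold Spec_calculate_odd_even; infer_instance

-- ===== CLAIM (what is proved, stated in full; the proofs are below) =====
def Claim_equal_calculate_odd_even : Prop := ∀ (number : Int), Dom_calculate_odd_even number → Spec_calculate_odd_even number (calculate_odd_even number)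

-- ===== LEMMAS AND PROOFS =====

-- A's `.sort()` on tuples (sorted2 with fst/snd keys) is sorting by the lexicographic key.
theorem sorted2_eq_sorted_toLex (xs : List (Int × Int)) :
    PySem.List.sorted2 xs Prod.fst Prod.snd = PySem.List.sorted xs (fun p => toLex p) := by
  unfold PySem.List.sorted2 PySem.List.sorted
  simp only [Bool.false_eq_true, if_false]
  congr 1
  funext acc x
  congr 1
  funext a b
  have hlt : (toLex a < toLex b) ↔ (a.1 < b.1 ∨ (a.1 = b.1 ∧ a.2 < b.2)) := Prod.Lex.lt_iff
  rw [show decide (toLex a < toLex b)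
        = decide (a.1 < b.1 ∨ (a.1 = b.1 ∧ a.2 < b.2)) from decide_eq_decide.mpr hlt]
  rcases lt_trichotomy a.1 b.1 with h | h | h
  · simp [h]
  · simp [h]
  · simp [lt_asymm h, ne_of_gt h]; omega

-- abbreviations used only in the proofs below
def pvR (n : Int) : List Int := PySem.List.pyRange 1 (n + 1) 1
def pvEv (n : Int) : List Int := (pvR n).filter (fun num => PySem.Int.mod num 2 == 0)
def pvOd (n : Int) : List Int := (pvR n).filter (fun num => !(PySem.Int.mod num 2 == 0))

-- the else-branch append loop is a negated filter
theorem foldl_append_else (p : Int → Bool) (l : List Int) (acc : List Int) :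
    l.foldl (fun acc x => if p x then acc else acc ++ [x]) acc
      = acc ++ l.filter (fun x => !p x) := by
  induction l generalizing acc with
  | nil => simp
  | cons h t ih => by_cases hp : p h <;> simp [hp, ih]

theorem append_list_eq (nums : List Int) :
    append_list nums = nums.flatMap (fun x => nums.map (fun y => (x, y))) := by
  unfold append_list
  rw [PySem.List.foldl_congr_mem nums _
      (fun all x => all ++ nums.map (fun y => (x, y))) []
      (fun acc x _ => PySem.List.foldl_append_singleton_eq_map (fun y => (x, y)) nums acc)]
  rw [PySem.List.foldl_append_eq_flatMap]
  simp

theorem partition_eq (n : Int) :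
    (pvR n).foldl
      (fun (oe : List Int × List Int) num =>
        if PySem.Int.mod num 2 == 0 then (oe.1, oe.2 ++ [num]) else (oe.1 ++ [num], oe.2))
      ([], []) = (pvOd n, pvEv n) := by
  have hfun : (fun (oe : List Int × List Int) num =>
        if PySem.Int.mod num 2 == 0 then (oe.1, oe.2 ++ [num]) else (oe.1 ++ [num], oe.2))
      = (fun (s : List Int × List Int) e =>
          (if PySem.Int.mod e 2 == 0 then s.1 else s.1 ++ [e],
           if PySem.Int.mod e 2 == 0 then s.2 ++ [e] else s.2)) := by
    funext oe num
    by_cases h : (PySem.Int.mod num 2 == 0) = true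
    · rw [if_pos h, if_pos h, if_pos h]
    · rw [if_neg h, if_neg h, if_neg h]
  rw [hfun,
    PySem.List.foldl_prod_mk
      (f := fun acc e => if PySem.Int.mod e 2 == 0 then acc else acc ++ [e])
      (g := fun acc e => if PySem.Int.mod e 2 == 0 then acc ++ [e] else acc),
    foldl_append_else, PySem.List.foldl_append_if_eq_filter]
  simp [pvOd, pvEv]

theorem A_closed (n : Int) :
    calculate_odd_even n =
      PySem.List.sorted
        ((pvEv n).flatMap (fun x => (pvEv n).map (fun y => (x, y)))
          ++ (pvOd n).flatMap (fun x => (pvOd n).map (fun y => (x, y))))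
        (fun p => toLex p) := by
  unfold calculate_odd_even
  rw [show PySem.List.pyRange 1 (n + 1) 1 = pvR n from rfl, partition_eq]
  simp only [append_list_eq, sorted2_eq_sorted_toLex]

theorem B_closed (n : Int) :
    calculate_odd_even_alt n =
      (pvR n).flatMap (fun x =>
        ((pvR n).filter (fun y => PySem.Int.mod (x - y) 2 == 0)).map (fun y => (x, y))) := by
  unfold calculate_odd_even_alt
  rw [show PySem.List.pyRange 1 (n + 1) 1 = pvR n from rfl]
  rw [PySem.List.foldl_congr_mem (pvR n) _
      (fun result x => result ++
        ((pvR n).filter (fun y => PySem.Int.mod (x - y) 2 == 0)).map (fun y => (x, y))) []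
      (fun acc x _ => PySem.List.foldl_append_if
        (fun y => PySem.Int.mod (x - y) 2 == 0) (fun y => (x, y)) (pvR n) acc)]
  rw [PySem.List.foldl_append_eq_flatMap]
  simp

theorem fmod_two (a : Int) : Int.fmod a 2 = a % 2 := by
  rw [Int.fmod_eq_emod]; norm_num

theorem filter_parity (n x : Int) :
    (pvR n).filter (fun y => PySem.Int.mod (x - y) 2 == 0)
      = if PySem.Int.mod x 2 == 0 then pvEv n else pvOd n := by
  by_cases hx : (PySem.Int.mod x 2 == 0) = true
  all_goals
    simp only [PySem.Int.mod, fmod_two, beq_iff_eq] at hx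
  · rw [if_pos (by simp [PySem.Int.mod, fmod_two, hx])]
    apply List.filter_congr
    intro y _
    simp only [PySem.Int.mod, fmod_two]
    rw [Bool.eq_iff_iff]
    simp only [beq_iff_eq]
    omega
  · rw [if_neg (by simp [PySem.Int.mod, fmod_two, hx])]
    apply List.filter_congr
    intro y _
    unfold pvOd at *
    simp only [PySem.Int.mod, fmod_two]
    rw [Bool.eq_iff_iff]
    simp only [beq_iff_eq, Bool.not_eq_true', beq_eq_false_iff_ne, ne_eq]
    omega

theorem B_perm (n : Int) :
    (calculate_odd_even_alt n).Perm
      ((pvEv n).flatMap (fun x => (pvEv n).map (fun y => (x, y)))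
        ++ (pvOd n).flatMap (fun x => (pvOd n).map (fun y => (x, y)))) := by
  rw [B_closed]
  have hsplit : (pvR n).Perm (pvEv n ++ pvOd n) :=
    (List.filter_append_perm (fun num => PySem.Int.mod num 2 == 0) (pvR n)).symm
  calc ((pvR n).flatMap (fun x =>
          ((pvR n).filter (fun y => PySem.Int.mod (x - y) 2 == 0)).map (fun y => (x, y)))).Perm
        ((pvEv n ++ pvOd n).flatMap (fun x =>
          ((pvR n).filter (fun y => PySem.Int.mod (x - y) 2 == 0)).map (fun y => (x, y)))) :=
      List.Perm.flatMap hsplit (fun a _ => List.Perm.refl _)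
    _ = _ := by
      rw [List.flatMap_append]
      congr 1
      · apply List.flatMap_congr
        intro x hx
        rw [filter_parity, if_pos (List.mem_filter.mp hx).2]
      · apply List.flatMap_congr
        intro x hx
        have hodd := (List.mem_filter.mp hx).2
        rw [filter_parity, if_neg (by simp_all)]

theorem pvR_pairwise (n : Int) : (pvR n).Pairwise (· < ·) :=
  PySem.List.pairwise_lt_pyRange_one 1 (n + 1)

theorem B_pairwise (n : Int) :
    (calculate_odd_even_alt n).Pairwise
      (fun a b => (fun p : Int × Int => toLex p) a < (fun p : Int × Int => toLex p) b) := by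
  rw [B_closed]
  rw [List.pairwise_flatMap]
  constructor
  · intro x _
    rw [List.pairwise_map]
    apply List.Pairwise.imp ?_ (((pvR_pairwise n).filter _))
    intro a b hab
    exact Prod.Lex.lt_iff.mpr (Or.inr ⟨rfl, hab⟩)
  · apply List.Pairwise.imp ?_ (pvR_pairwise n)
    intro x1 x2 h12 p hp q hq
    obtain ⟨y1, _, rfl⟩ := List.mem_map.mp hp
    obtain ⟨y2, _, rfl⟩ := List.mem_map.mp hq
    exact Prod.Lex.lt_iff.mpr (Or.inl h12)

-- ===== VERDICT (by name: the statement is the Claim_ definition above) =====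
theorem calculate_odd_even_spec : Claim_equal_calculate_odd_even := by
  intro n _
  unfold Spec_calculate_odd_even
  rw [A_closed]
  exact PySem.List.sorted_eq_of_perm_of_pairwise_lt _ _ _ (B_perm n) (B_pairwise n)
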